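-- pv_equiv track=rewrite | github.com/xuychen/Leetcode | interviews/amazon/others/sizeKSubstringWithDistinctChars.py | distinctSubstring
-- ===== SOURCE A (Python) =====
-- from collections import Counter
--
-- def distinctSubstring(s, k):
--     counter = Counter(s[:k])
--     num = k - len(counter)
--     result = set([s[:k]]) if not num else set()
--
--     for i in range(k, len(s)):
--         counter[s[i]] += 1
--         if counter[s[i]] == 1:
--             num -= 1
--
--         counter[s[i-k]] -= 1
--         if counter[s[i-k]] == 0:
--             num += 1
--
--         if not num:
--             result.add(s[i-k+1: i+1])
--
--     return list(result)
-- ===== SOURCE B (Python) =====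
-- def distinctSubstring(s, k):
--     result = set()
--     for i in range(len(s) - k + 1):
--         w = s[i:i+k]
--         if len(set(w)) == k:
--             result.add(w)
--     return list(result)
-- ===== Notes on version B (the rewrite author's own statement) =====
-- stated objective: simpler
-- what changed: Replaces the incremental Counter/deficit sliding window with a direct scan over all window start positions that recomputes each window's distinct-character count from scratch via set(w).
import Mathlib
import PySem

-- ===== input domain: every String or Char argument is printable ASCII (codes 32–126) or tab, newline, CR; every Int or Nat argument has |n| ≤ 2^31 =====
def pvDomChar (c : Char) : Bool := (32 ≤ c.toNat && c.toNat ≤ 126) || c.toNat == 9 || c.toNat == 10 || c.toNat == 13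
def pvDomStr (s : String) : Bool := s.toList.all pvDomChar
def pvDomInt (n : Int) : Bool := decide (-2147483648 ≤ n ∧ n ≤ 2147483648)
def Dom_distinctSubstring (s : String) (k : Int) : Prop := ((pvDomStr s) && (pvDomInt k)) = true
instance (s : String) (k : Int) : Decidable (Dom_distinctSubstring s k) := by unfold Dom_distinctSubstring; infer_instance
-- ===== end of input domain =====

-- B drops A's incremental Counter/deficit sliding window and instead scans every window
-- start, recomputing each window's distinct-character count from scratch (objective: simpler).

-- ===== PORT A =====
-- loop body of A's `for i in range(k, len(s))`, state = (counter, num, result)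
def pvAStep (s : String) (k : Int) (st : PySem.Dict Char Int × Int × PySem.Set String) (i : Int) :
    PySem.Dict Char Int × Int × PySem.Set String :=
  let ci := PySem.List.pyGetD s.toList i ' '            -- s[i]; in range whenever 0 ≤ k (Pre_)
  let counter1 := st.1.modify ci 0 (· + 1)              -- counter[s[i]] += 1
  let num1 := if counter1.getD ci 0 = 1 then st.2.1 - 1 else st.2.1
  let cj := PySem.List.pyGetD s.toList (i - k) ' '      -- s[i-k]; in range whenever 0 ≤ k
  let counter2 := counter1.modify cj 0 (· - 1)          -- counter[s[i-k]] -= 1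
  let num2 := if counter2.getD cj 0 = 0 then num1 + 1 else num1
  let result :=
    if num2 = 0 then st.2.2.add (PySem.Str.slice s (some (i - k + 1)) (some (i + 1))) else st.2.2
  (counter2, num2, result)

def distinctSubstring (s : String) (k : Int) : List String :=
  let counter : PySem.Dict Char Int := PySem.Dict.counter (PySem.Str.slice s none (some k)).toList
  let num : Int := k - counter.size
  let result : PySem.Set String :=
    if num = 0 then PySem.Set.ofList [PySem.Str.slice s none (some k)] else PySem.Set.empty
  ((PySem.List.pyRange k (PySem.Str.len s) 1).foldl (pvAStep s k) (counter, num, result)).2.2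

-- ===== PORT B =====
-- loop body of B's `for i in range(len(s) - k + 1)`
def pvBStep (s : String) (k : Int) (result : PySem.Set String) (i : Int) : PySem.Set String :=
  let w := PySem.Str.slice s (some i) (some (i + k))
  if ((PySem.Set.ofList w.toList).length : Int) = k then result.add w else result

def distinctSubstring_alt (s : String) (k : Int) : List String :=
  (PySem.List.pyRange 0 (PySem.Str.len s - k + 1) 1).foldl (pvBStep s k) PySem.Set.empty

-- ===== PRECONDITION & SPEC =====
-- Pre_ excludes k < 0, on which A always raises IndexError (its index arithmetic walks past the end of s).
def Pre_distinctSubstring (s : String) (k : Int) : Prop := 0 ≤ k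
instance (s : String) (k : Int) : Decidable (Pre_distinctSubstring s k) := by
  unfold Pre_distinctSubstring; infer_instance

def pvWitness_distinctSubstring : String × Int := ("aba", 2)

def Spec_distinctSubstring (s : String) (k : Int) (out : List String) : Prop :=
  out = distinctSubstring_alt s k
instance (s : String) (k : Int) (out : List String) : Decidable (Spec_distinctSubstring s k out) := by
  unfold Spec_distinctSubstring; infer_instance

-- ===== CLAIM (what is proved, stated in full; the proofs are below) =====
def Claim_equal_distinctSubstring : Prop := ∀ (s : String) (k : Int),
  Dom_distinctSubstring s k → Pre_distinctSubstring s k →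
  Spec_distinctSubstring s k (distinctSubstring s k)

-- ===== LEMMAS AND PROOFS =====

-- the window of length k' starting at t, and the distinct count as B computes it
def pvNd (l : List Char) : Nat := (PySem.Set.ofList l).length

lemma pvNd_le_length (l : List Char) : pvNd l ≤ l.length := PySem.Set.length_ofList_le l

lemma pvNd_append_singleton (l : List Char) (a : Char) :
    pvNd (l ++ [a]) = pvNd l + (if a ∈ l then 0 else 1) := by
  unfold pvNd
  rw [PySem.Set.ofList_append_singleton, PySem.Set.add_eq_ite]
  split_ifs with h1 h2 h2
  · rfl
  · exact absurd ((PySem.Set.mem_ofList l a).mp h1) h2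
  · exact absurd ((PySem.Set.mem_ofList l a).mpr h2) h1
  · simp

lemma pvNd_eq_card (l : List Char) : pvNd l = l.toFinset.card := by
  unfold pvNd
  rw [← List.toFinset_card_of_nodup (PySem.Set.nodup_ofList l)]
  congr 1
  ext x
  simp [List.mem_toFinset, PySem.Set.mem_ofList]

lemma pvNd_cons (a : Char) (l : List Char) :
    pvNd (a :: l) = pvNd l + (if a ∈ l then 0 else 1) := by
  rw [pvNd_eq_card, pvNd_eq_card, List.toFinset_cons]
  split_ifs with h
  · rw [Finset.card_insert_of_mem (List.mem_toFinset.mpr h)]; omega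
  · rw [Finset.card_insert_of_notMem (fun hc => h (List.mem_toFinset.mp hc))]

def pvWin (cs : List Char) (t k' : Nat) : List Char := (cs.drop t).take k'

lemma pvWin_slide {cs : List Char} {t k' : Nat} (h : t + k' < cs.length) :
    pvWin cs t k' ++ [cs[t + k']] = cs[t]'(by omega) :: pvWin cs (t + 1) k' := by
  unfold pvWin
  have h1 : (cs.drop t).take (k' + 1) = (cs.drop t).take k' ++ [cs[t + k']] := by
    rw [List.take_add_one]
    congr 1
    have : (cs.drop t)[k']? = some cs[t + k'] := by
      rw [List.getElem?_drop]
      rw [List.getElem?_eq_getElem (by omega)]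
    simp [this]
  have h2 : (cs.drop t).take (k' + 1) = cs[t]'(by omega) :: (cs.drop (t + 1)).take k' := by
    rw [List.drop_eq_getElem_cons (by omega : t < cs.length)]
    rfl
  rw [← h1, h2]

lemma pvStep_spec (s : String) (k' t : Nat) (h : t + k' < s.toList.length)
    (d : PySem.Dict Char Int) (num : Int) (r : PySem.Set String)
    (hd : ∀ c, d.getD c 0 = ((pvWin s.toList t k').count c : Int))
    (hnum : num = (k' : Int) - (pvNd (pvWin s.toList t k') : Int)) :
    (∀ c, (pvAStep s (k' : Int) (d, num, r) ((k' : Int) + (t : Int))).1.getD c 0 =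
        ((pvWin s.toList (t + 1) k').count c : Int)) ∧
    (pvAStep s (k' : Int) (d, num, r) ((k' : Int) + (t : Int))).2.1 =
        (k' : Int) - (pvNd (pvWin s.toList (t + 1) k') : Int) ∧
    (pvAStep s (k' : Int) (d, num, r) ((k' : Int) + (t : Int))).2.2 =
        pvBStep s (k' : Int) r ((t : Int) + 1) := by
  set cs := s.toList with hcs
  have ha : PySem.List.pyGetD cs ((k' : Int) + (t : Int)) ' ' = cs[t + k'] := by
    rw [show ((k' : Int) + (t : Int)) = ((t + k' : Nat) : Int) by push_cast; ring,
      PySem.List.pyGetD_natCast, List.getD_eq_getElem _ _ h]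
  have hb : PySem.List.pyGetD cs ((k' : Int) + (t : Int) - (k' : Int)) ' ' = cs[t]'(by omega) := by
    rw [show ((k' : Int) + (t : Int) - (k' : Int)) = ((t : Nat) : Int) by ring,
      PySem.List.pyGetD_natCast, List.getD_eq_getElem _ _ (by omega)]
  set a := cs[t + k'] with ha'
  set b := cs[t]'(by omega) with hb'
  have hs : pvWin cs t k' ++ [a] = b :: pvWin cs (t + 1) k' := pvWin_slide h
  have hcnt : ∀ c : Char, (pvWin cs t k').count c + (if a = c then 1 else 0) =
      (pvWin cs (t + 1) k').count c + (if b = c then 1 else 0) := by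
    intro c
    have hh := congrArg (List.count c) hs
    simpa only [List.count_append, List.count_cons, List.count_nil, beq_iff_eq,
      Nat.zero_add, Nat.add_zero, zero_add, add_zero] using hh
  have hC1 : ∀ c, (d.modify a 0 (· + 1)).getD c 0 =
      (if c = a then ((pvWin cs t k').count a : Int) + 1 else ((pvWin cs t k').count c : Int)) := by
    intro c
    rw [PySem.Dict.getD_modify, hd, hd]
  have hC1a : (d.modify a 0 (· + 1)).getD a 0 = ((pvWin cs t k').count a : Int) + 1 := by
    rw [hC1]; simp
  have hC2 : ∀ c, ((d.modify a 0 (· + 1)).modify b 0 (· - 1)).getD c 0 =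
      ((pvWin cs (t + 1) k').count c : Int) := by
    intro c
    rw [PySem.Dict.getD_modify, hC1, hC1]
    have k1 := hcnt c
    split_ifs with e1 e2 e2
    · rw [e1, e2] at k1 ⊢
      simp at k1
      omega
    · have e2' : ¬ (a = b) := fun hx => e2 hx.symm
      rw [e1] at k1 ⊢
      simp [e2'] at k1
      omega
    · have e1' : ¬ (b = a) := fun hx => e1 (e2.trans hx.symm)
      have e1'' : ¬ (b = c) := fun hx => e1 hx.symm
      rw [e2] at k1 ⊢
      rw [e2] at e1''
      simp [e1''] at k1
      omega
    · have e1' : ¬ (b = c) := fun hx => e1 hx.symm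
      have e2' : ¬ (a = c) := fun hx => e2 hx.symm
      simp [e1', e2'] at k1
      omega
  have hC2b : ((d.modify a 0 (· + 1)).modify b 0 (· - 1)).getD b 0 =
      ((pvWin cs (t + 1) k').count b : Int) := hC2 b
  have e1 : ((((pvWin cs t k').count a : Int) + 1 = 1)) ↔ ¬ (a ∈ pvWin cs t k') := by
    rw [← List.count_eq_zero]; omega
  have e2 : (((pvWin cs (t + 1) k').count b : Int) = 0) ↔ ¬ (b ∈ pvWin cs (t + 1) k') := by
    rw [← List.count_eq_zero]; omega
  have e3 : pvNd (pvWin cs t k') + (if a ∈ pvWin cs t k' then 0 else 1) =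
      pvNd (pvWin cs (t + 1) k') + (if b ∈ pvWin cs (t + 1) k' then 0 else 1) := by
    have hx := pvNd_append_singleton (pvWin cs t k') a
    rw [hs, pvNd_cons] at hx
    omega
  have hnum2 : (if ((d.modify a 0 (· + 1)).modify b 0 (· - 1)).getD b 0 = 0 then
        (if (d.modify a 0 (· + 1)).getD a 0 = 1 then num - 1 else num) + 1
        else (if (d.modify a 0 (· + 1)).getD a 0 = 1 then num - 1 else num)) =
      (k' : Int) - (pvNd (pvWin cs (t + 1) k') : Int) := by
    rw [hC2b, hC1a, hnum]
    split_ifs with f1 f2 f2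
    · have m1 := e2.mp f1
      have m2 := e1.mp f2
      rw [if_neg m2, if_neg m1] at e3
      omega
    · have m1 := e2.mp f1
      have m2 : a ∈ pvWin cs t k' := by by_contra hc; exact f2 (e1.mpr hc)
      rw [if_pos m2, if_neg m1] at e3
      omega
    · have m1 : b ∈ pvWin cs (t + 1) k' := by by_contra hc; exact f1 (e2.mpr hc)
      have m2 := e1.mp f2
      rw [if_neg m2, if_pos m1] at e3
      omega
    · have m1 : b ∈ pvWin cs (t + 1) k' := by by_contra hc; exact f1 (e2.mpr hc)
      have m2 : a ∈ pvWin cs t k' := by by_contra hc; exact f2 (e1.mpr hc)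
      rw [if_pos m2, if_pos m1] at e3
      omega
  refine ⟨?_, ?_, ?_⟩
  · intro c
    simp only [pvAStep, ← hcs, ha, hb]
    exact hC2 c
  · simp only [pvAStep, ← hcs, ha, hb]
    exact hnum2
  · simp only [pvAStep, ← hcs, ha, hb]
    rw [hnum2]
    simp only [pvBStep]
    rw [show ((k' : Int) + (t : Int) - (k' : Int) + 1) = ((t : Int) + 1) by ring,
        show ((k' : Int) + (t : Int) + 1) = ((t : Int) + 1 + (k' : Int)) by ring]
    have hwl : (PySem.Str.slice s (some ((t : Int) + 1)) (some ((t : Int) + 1 + (k' : Int)))).toList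
        = pvWin cs (t + 1) k' := by
      rw [PySem.Str.toList_slice, PySem.Chars.slice_eq_listSlice, ← hcs,
        show ((t : Int) + 1) = ((t + 1 : Nat) : Int) by push_cast; ring]
      rw [show (((t + 1 : Nat) : Int) + (k' : Int)) = (((t + 1 : Nat) : Int) + ((k' : Nat) : Int)) by norm_cast]
      exact PySem.List.slice_natCast_add cs (t + 1) k'
    rw [hwl]
    have hnd : ((PySem.Set.ofList (pvWin cs (t + 1) k')).length : Int) =
        (pvNd (pvWin cs (t + 1) k') : Int) := rfl
    rw [hnd]
    split_ifs with g1 g2 g2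
    · rfl
    · omega
    · omega
    · rfl

lemma pvLoop (s : String) (k' : Nat) :
    ∀ (m t : Nat) (d : PySem.Dict Char Int) (num : Int) (r : PySem.Set String),
    s.toList.length - (t + k') = m → t + k' ≤ s.toList.length →
    (∀ c, d.getD c 0 = ((pvWin s.toList t k').count c : Int)) →
    num = (k' : Int) - (pvNd (pvWin s.toList t k') : Int) →
    ((PySem.List.pyRange ((k' : Int) + (t : Int)) (PySem.Str.len s) 1).foldl
        (pvAStep s (k' : Int)) (d, num, r)).2.2
      = (PySem.List.pyRange ((t : Int) + 1) (PySem.Str.len s - (k' : Int) + 1) 1).foldl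
          (pvBStep s (k' : Int)) r := by
  intro m
  induction m with
  | zero =>
    intro t d num r hm hle hd hnum
    rw [PySem.Str.len_eq,
      PySem.List.pyRange_one_eq_nil (by omega),
      PySem.List.pyRange_one_eq_nil (by omega)]
    rfl
  | succ m ih =>
    intro t d num r hm hle hd hnum
    have hlt : t + k' < s.toList.length := by omega
    rw [PySem.Str.len_eq,
      PySem.List.pyRange_one_cons (a := (k' : Int) + (t : Int)) (by omega),
      PySem.List.pyRange_one_cons (a := (t : Int) + 1) (by omega),
      List.foldl_cons, List.foldl_cons]
    obtain ⟨h1, h2, h3⟩ := pvStep_spec s k' t hlt d num r hd hnum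
    have key := ih (t + 1)
      (pvAStep s (k' : Int) (d, num, r) ((k' : Int) + (t : Int))).1
      (pvAStep s (k' : Int) (d, num, r) ((k' : Int) + (t : Int))).2.1
      (pvAStep s (k' : Int) (d, num, r) ((k' : Int) + (t : Int))).2.2
      (by omega) (by omega) h1 h2
    rw [PySem.Str.len_eq] at key
    rw [show ((k' : Int) + ((t + 1 : Nat) : Int)) = ((k' : Int) + (t : Int) + 1) by push_cast; ring,
        show (((t + 1 : Nat) : Int) + 1) = ((t : Int) + 1 + 1) by push_cast; ring] at key
    have heta : ((pvAStep s (k' : Int) (d, num, r) ((k' : Int) + (t : Int))).1,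
        (pvAStep s (k' : Int) (d, num, r) ((k' : Int) + (t : Int))).2.1,
        (pvAStep s (k' : Int) (d, num, r) ((k' : Int) + (t : Int))).2.2)
        = pvAStep s (k' : Int) (d, num, r) ((k' : Int) + (t : Int)) := rfl
    rw [heta, h3] at key
    exact key

theorem pvFinal (s : String) (k' : Nat) :
    (let counter : PySem.Dict Char Int :=
        PySem.Dict.counter (PySem.Str.slice s none (some (k' : Int))).toList
      let num : Int := (k' : Int) - counter.size
      let result : PySem.Set String :=
        if num = 0 then PySem.Set.ofList [PySem.Str.slice s none (some (k' : Int))]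
        else PySem.Set.empty
      ((PySem.List.pyRange (k' : Int) (PySem.Str.len s) 1).foldl
        (pvAStep s (k' : Int)) (counter, num, result)).2.2)
    = (PySem.List.pyRange 0 (PySem.Str.len s - (k' : Int) + 1) 1).foldl
        (pvBStep s (k' : Int)) PySem.Set.empty := by
  set cs := s.toList with hcs
  have hpl : (PySem.Str.slice s none (some (k' : Int))).toList = List.take k' cs := by
    rw [PySem.Str.toList_slice, PySem.Chars.slice_eq_listSlice, ← hcs]
    exact PySem.List.slice_to_natCast cs k'
  have hsize : (PySem.Dict.counter (PySem.Str.slice s none (some (k' : Int))).toList).size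
      = pvNd (List.take k' cs) := by
    rw [hpl]
    simp [PySem.Dict.size, PySem.Dict.items_counter, pvNd]
  by_cases hk : k' ≤ cs.length
  · -- main case: at least one window exists
    have hw0 : pvWin cs 0 k' = List.take k' cs := by simp [pvWin]
    have hd0 : ∀ c, (PySem.Dict.counter (PySem.Str.slice s none (some (k' : Int))).toList).getD c 0
        = ((pvWin cs 0 k').count c : Int) := by
      intro c
      rw [PySem.Dict.getD_counter, hpl, hw0]
    -- the first window string of B equals A's prefix string
    have hws : PySem.Str.slice s (some (0 : Int)) (some ((0 : Int) + (k' : Int)))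
        = PySem.Str.slice s none (some (k' : Int)) := by
      apply String.ext
      rw [PySem.Str.toList_slice, PySem.Str.toList_slice, PySem.Chars.slice_eq_listSlice,
        PySem.Chars.slice_eq_listSlice, show ((0 : Int) + (k' : Int)) = (k' : Int) by ring,
        PySem.List.slice_zero_start]
    have hinit : (if ((k' : Int) - (pvNd (pvWin cs 0 k') : Int)) = 0 then
          PySem.Set.ofList [PySem.Str.slice s none (some (k' : Int))] else PySem.Set.empty)
        = pvBStep s (k' : Int) PySem.Set.empty 0 := by
      simp only [pvBStep, hws, hpl, ← hw0]
      have hnd : ((PySem.Set.ofList (pvWin cs 0 k')).length : Int) =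
          (pvNd (pvWin cs 0 k') : Int) := rfl
      rw [hnd]
      split_ifs with g1 g2 g2
      · rfl
      · omega
      · omega
      · rfl
    simp only [hsize, ← hw0, hinit]
    have key := pvLoop s k' (cs.length - k') 0
      (PySem.Dict.counter (PySem.Str.slice s none (some (k' : Int))).toList)
      ((k' : Int) - (pvNd (pvWin cs 0 k') : Int))
      (pvBStep s (k' : Int) PySem.Set.empty 0)
      (by rw [← hcs]; omega) (by rw [← hcs]; omega) hd0 rfl
    rw [show ((k' : Int) + ((0 : Nat) : Int)) = (k' : Int) by push_cast; ring,
        show (((0 : Nat) : Int) + 1) = (1 : Int) by norm_num] at key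
    rw [key, PySem.Str.len_eq]
    rw [PySem.List.pyRange_one_cons (a := (0 : Int)) (by rw [← hcs]; omega),
      List.foldl_cons]
    norm_num
  · -- k' > len(s): no window; both sides are empty
    have hn : cs.length < k' := by omega
    have htk : List.take k' cs = cs := List.take_of_length_le (by omega)
    have hnum0 : ((k' : Int) - (pvNd (List.take k' cs) : Int)) ≠ 0 := by
      have := pvNd_le_length (List.take k' cs)
      rw [htk] at this ⊢
      omega
    simp only [hsize]
    rw [if_neg hnum0, PySem.Str.len_eq,
      PySem.List.pyRange_one_eq_nil (by rw [← hcs]; omega),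
      PySem.List.pyRange_one_eq_nil (by rw [← hcs]; omega)]
    rfl

-- ===== VERDICT (by name: the statement is the Claim_ definition above) =====
theorem distinctSubstring_spec : Claim_equal_distinctSubstring := by
  intro s k _ hpre
  unfold Spec_distinctSubstring distinctSubstring distinctSubstring_alt
  obtain ⟨k', rfl⟩ : ∃ k' : Nat, k = (k' : Int) := ⟨k.toNat, (Int.toNat_of_nonneg hpre).symm⟩
  exact pvFinal s k'
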